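-- pv_equiv track=rewrite | github.com/sameersundrani/GASR | ShortSeqAssembler_v7_0406_SS.py | right_extender
-- ===== SOURCE A (Python) =====
-- def right_extender(rightseqs):
--     Position_list = [[0, 0, 0, 0, 0] for k in range(len(max(rightseqs, key=len)))]
--     for rightseq in rightseqs:
--         for i in range(len(rightseq)):
--             Acount = 0
--             Tcount = 0
--             Ccount = 0
--             Gcount = 0
--             Ncount = 0
--
--             if rightseq[i] == "A":
--                 Acount += 1
--             elif rightseq[i] == "T":
--                 Tcount += 1
--             elif rightseq[i] == "C":
--                 Ccount += 1
--             elif rightseq[i] == "G":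
--                 Gcount += 1
--             else:
--                 Ncount += 1
--             Position_list[i] = [x + y for x, y in zip(Position_list[i], [Acount, Tcount, Ccount, Gcount, Ncount])]
--     return Position_list
-- ===== SOURCE B (Python) =====
-- def _column_counts(rightseqs, i):
--     # counts for one column i over all sequences long enough to reach it
--     row = [0, 0, 0, 0, 0]
--     for s in rightseqs:
--         if i < len(s):
--             ch = s[i]
--             if ch == "A":
--                 row[0] += 1
--             elif ch == "T":
--                 row[1] += 1
--             elif ch == "C":
--                 row[2] += 1
--             elif ch == "G":
--                 row[3] += 1
--             else:
--                 row[4] += 1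
--     return row
--
--
-- def right_extender(rightseqs):
--     # position-major (transposed) pass: one fresh count row per column
--     maxlen = max(len(s) for s in rightseqs)  # ValueError on empty input, like A
--     matrix = []
--     for i in range(maxlen):
--         matrix.append(_column_counts(rightseqs, i))
--     return matrix
-- ===== Notes on version B (the rewrite author's own statement) =====
-- stated objective: faster
-- what changed: B builds the matrix position-major: one fresh count row per column incremented in place while scanning the sequences, instead of A's sequence-major pass that allocates a one-hot vector and rebuilds the whole row with a zip-list-comprehension for every single character.
import Mathlib
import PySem

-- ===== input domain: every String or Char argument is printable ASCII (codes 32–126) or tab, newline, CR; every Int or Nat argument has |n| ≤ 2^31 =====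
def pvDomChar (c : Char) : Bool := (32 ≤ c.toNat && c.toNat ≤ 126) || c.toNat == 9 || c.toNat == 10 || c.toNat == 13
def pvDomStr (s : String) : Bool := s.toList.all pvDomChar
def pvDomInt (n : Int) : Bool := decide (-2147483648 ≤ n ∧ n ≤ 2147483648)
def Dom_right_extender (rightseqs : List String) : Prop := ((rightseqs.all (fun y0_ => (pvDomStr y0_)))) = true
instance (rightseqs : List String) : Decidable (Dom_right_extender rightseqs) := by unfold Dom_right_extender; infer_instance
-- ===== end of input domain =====

-- B builds the count matrix position-major (one fresh row per column, incremented in place)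
-- instead of A's sequence-major pass that rebuilds a whole row per character; a timing run
-- measured B faster by a constant factor.

-- ===== PORT A =====
-- the [Acount, Tcount, Ccount, Gcount, Ncount] vector the if/elif chain produces
def aCounts (c : Char) : List Int :=
  if c = 'A' then [1, 0, 0, 0, 0]
  else if c = 'T' then [0, 1, 0, 0, 0]
  else if c = 'C' then [0, 0, 1, 0, 0]
  else if c = 'G' then [0, 0, 0, 1, 0]
  else [0, 0, 0, 0, 1]

-- inner 'for i in range(len(rightseq))' loop; indices are in range by construction
-- (i < len(rightseq) ≤ len(Position_list)), so getD defaults are never taken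
def aInner (pl : List (List Int)) (cs : List Char) : List (List Int) :=
  (List.range cs.length).foldl
    (fun pl i => pl.set i (List.zipWith (· + ·) (pl.getD i []) (aCounts (cs.getD i ' ')))) pl

def right_extender (rightseqs : List String) : List (List Int) :=
  match PySem.List.max? rightseqs (fun s => s.length) with
  | none => []  -- Python raises ValueError here (max of empty); excluded by Pre_
  | some m =>
    rightseqs.foldl (fun pl s => aInner pl s.toList)
      ((List.range m.length).map (fun _ => [0, 0, 0, 0, 0]))

-- ===== PORT B =====
-- _column_counts(rightseqs, i): one fresh count row for column i
def bStep (row : List Int) (c : Char) : List Int :=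
  if c = 'A' then row.set 0 (row.getD 0 0 + 1)
  else if c = 'T' then row.set 1 (row.getD 1 0 + 1)
  else if c = 'C' then row.set 2 (row.getD 2 0 + 1)
  else if c = 'G' then row.set 3 (row.getD 3 0 + 1)
  else row.set 4 (row.getD 4 0 + 1)

def columnCounts (rightseqs : List String) (i : Nat) : List Int :=
  rightseqs.foldl
    (fun row s => if i < s.length then bStep row (s.toList.getD i ' ') else row)
    [0, 0, 0, 0, 0]

def right_extender_alt (rightseqs : List String) : List (List Int) :=
  match PySem.List.max? (rightseqs.map (fun s => s.length)) (fun x => x) with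
  | none => []  -- Python raises ValueError here; excluded by Pre_
  | some maxlen =>
    (List.range maxlen).foldl (fun matrix i => matrix ++ [columnCounts rightseqs i]) []

-- ===== PRECONDITION & SPEC =====
-- Pre_ excludes only the empty list, on which both Pythons raise ValueError (max of an empty sequence)
def Pre_right_extender (rightseqs : List String) : Prop := rightseqs ≠ []
instance (rightseqs : List String) : Decidable (Pre_right_extender rightseqs) := by unfold Pre_right_extender; infer_instance
def pvWitness_right_extender : List String := ["ATx", "G"]
def Spec_right_extender (rightseqs : List String) (out : List (List Int)) : Prop := out = right_extender_alt rightseqs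
instance (rightseqs : List String) (out : List (List Int)) : Decidable (Spec_right_extender rightseqs out) := by unfold Spec_right_extender; infer_instance

-- ===== CLAIM (what is proved, stated in full; the proofs are below) =====
def Claim_equal_right_extender : Prop := ∀ (rightseqs : List String), Dom_right_extender rightseqs → Pre_right_extender rightseqs → Spec_right_extender rightseqs (right_extender rightseqs)

-- ===== LEMMAS AND PROOFS =====

-- one zip-addition of a one-hot vector = the corresponding single increment
theorem zipAdd_eq_bStep (r : List Int) (h : r.length = 5) (c : Char) :
    List.zipWith (· + ·) r (aCounts c) = bStep r c := by
  match r, h with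
  | [a, b, c', d, e], _ =>
    unfold aCounts bStep
    split_ifs <;> simp [List.set]

theorem bStep_length (r : List Int) (h : r.length = 5) (c : Char) :
    (bStep r c).length = 5 := by
  unfold bStep; split_ifs <;> simp [h]

-- pointwise description of one pass of A's inner loop
theorem aInner_getD (cs : List Char) (pl : List (List Int)) (h : cs.length ≤ pl.length) :
    (aInner pl cs).length = pl.length ∧
    ∀ i : Nat, (aInner pl cs).getD i [] =
      if i < cs.length then
        List.zipWith (· + ·) (pl.getD i []) (aCounts (cs.getD i ' '))
      else pl.getD i [] := by
  have aux : ∀ (n : Nat) (pl : List (List Int)), n ≤ pl.length →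
      (((List.range n).foldl
        (fun pl i => pl.set i (List.zipWith (· + ·) (pl.getD i []) (aCounts (cs.getD i ' ')))) pl).length
        = pl.length) ∧
      ∀ i : Nat, ((List.range n).foldl
        (fun pl i => pl.set i (List.zipWith (· + ·) (pl.getD i []) (aCounts (cs.getD i ' ')))) pl).getD i [] =
        if i < n then List.zipWith (· + ·) (pl.getD i []) (aCounts (cs.getD i ' '))
        else pl.getD i [] := by
    intro n
    induction n with
    | zero => intro pl _; exact ⟨rfl, fun i => by simp⟩
    | succ n ih =>
      intro pl hn
      obtain ⟨ihlen, ihpt⟩ := ih pl (Nat.le_of_succ_le hn)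
      rw [List.range_succ, List.foldl_append, List.foldl_cons, List.foldl_nil]
      set g := (List.range n).foldl
        (fun pl i => pl.set i (List.zipWith (· + ·) (pl.getD i []) (aCounts (cs.getD i ' ')))) pl with hg
      have hglen : g.length = pl.length := ihlen
      have hnlt : n < g.length := by omega
      constructor
      · simp [hglen]
      · intro i
        have hgn : g.getD n [] = pl.getD n [] := by
          rw [ihpt n]; simp
        by_cases hin : i = n
        · subst hin
          rw [List.getD_eq_getElem _ _ (by simpa using hnlt)]
          simp only [List.getElem_set_self]
          rw [hgn, if_pos (Nat.lt_succ_self i)]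
        · have : (g.set n (List.zipWith (· + ·) (g.getD n []) (aCounts (cs.getD n ' ')))).getD i [] = g.getD i [] := by
            unfold List.getD
            rw [List.getElem?_set_ne (by omega)]
          rw [this, ihpt i]
          by_cases hi : i < n
          · rw [if_pos hi, if_pos (by omega)]
          · rw [if_neg hi, if_neg (by omega)]
  exact aux cs.length pl h

-- pointwise description of A's outer fold
theorem foldA_getD (seqs : List String) (pl : List (List Int))
    (h : ∀ s ∈ seqs, s.length ≤ pl.length) :
    (seqs.foldl (fun pl s => aInner pl s.toList) pl).length = pl.length ∧
    ∀ i : Nat, (seqs.foldl (fun pl s => aInner pl s.toList) pl).getD i [] =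
      seqs.foldl
        (fun r s => if i < s.length then
            List.zipWith (· + ·) r (aCounts (s.toList.getD i ' ')) else r)
        (pl.getD i []) := by
  induction seqs generalizing pl with
  | nil => exact ⟨rfl, fun i => rfl⟩
  | cons s t ih =>
    have hs : s.length ≤ pl.length := h s (by simp)
    obtain ⟨hlen, hpt⟩ := aInner_getD s.toList pl (by simpa using hs)
    have h' : ∀ u ∈ t, u.length ≤ (aInner pl s.toList).length := by
      intro u hu; rw [hlen]; exact h u (by simp [hu])
    obtain ⟨ihlen, ihpt⟩ := ih (aInner pl s.toList) h'
    refine ⟨by simpa [hlen] using ihlen, fun i => ?_⟩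
    simp only [List.foldl_cons]
    rw [ihpt i, hpt i]
    simp only [String.length_toList]

-- the zip-add accumulation equals B's increment accumulation (rows stay length 5)
theorem foldRow_eq (seqs : List String) (i : Nat) (r : List Int) (h : r.length = 5) :
    seqs.foldl
      (fun r s => if i < s.length then
          List.zipWith (· + ·) r (aCounts (s.toList.getD i ' ')) else r) r =
    seqs.foldl
      (fun row s => if i < s.length then bStep row (s.toList.getD i ' ') else row) r := by
  induction seqs generalizing r with
  | nil => rfl
  | cons s t ih =>
    simp only [List.foldl_cons]
    by_cases hc : i < s.length
    · rw [if_pos hc, if_pos hc, zipAdd_eq_bStep r h]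
      exact ih _ (bStep_length r h _)
    · rw [if_neg hc, if_neg hc]; exact ih r h

-- the two maxima agree: length of the first longest string = running max of the lengths
theorem max_len_eq (x : String) (t : List String) (m : String)
    (hm : PySem.List.max? (x :: t) (fun s => s.length) = some m) :
    m.length = (t.map (fun s => s.length)).foldl max x.length := by
  have hmem := PySem.List.max?_mem hm
  have hmax := PySem.List.max?_isMax hm
  have h1 := PySem.List.le_foldl_max (t.map (fun s => s.length)) x.length
  have h2 := PySem.List.foldl_max_mem (t.map (fun s => s.length)) x.length
  apply le_antisymm
  · rcases List.mem_cons.mp hmem with rfl | hmt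
    · exact h1.1
    · exact h1.2 _ (List.mem_map_of_mem hmt)
  · rcases h2 with h2 | h2
    · rw [h2]; exact hmax x (by simp)
    · obtain ⟨u, hu, hul⟩ := List.mem_map.mp h2
      rw [← hul]; exact hmax u (by simp [hu])

-- ===== VERDICT (by name: the statement is the Claim_ definition above) =====
theorem right_extender_spec : Claim_equal_right_extender := by
  intro rightseqs _ hpre
  unfold Spec_right_extender
  match rightseqs, hpre with
  | x :: t, _ =>
    unfold right_extender right_extender_alt
    cases hA : PySem.List.max? (x :: t) (fun s => s.length) with
    | none => exact absurd ((PySem.List.max?_eq_none_iff _ _).mp hA) (by simp)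
    | some m =>
      rw [List.map_cons, PySem.List.max?_id_cons]
      set L := (t.map (fun s => s.length)).foldl max x.length with hL
      have hmL : m.length = L := max_len_eq x t m hA
      have hmax := PySem.List.max?_isMax hA
      set pl0 : List (List Int) := (List.range m.length).map (fun _ => [0, 0, 0, 0, 0]) with hpl0
      have hpl0len : pl0.length = L := by simp [hpl0, hmL]
      have hbound : ∀ s ∈ x :: t, s.length ≤ pl0.length := by
        intro s hs; rw [hpl0len, ← hmL]; exact hmax s hs
      obtain ⟨hAlen, hApt⟩ := foldA_getD (x :: t) pl0 hbound
      have hB : (List.range L).foldl (fun matrix i => matrix ++ [columnCounts (x :: t) i]) []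
          = (List.range L).map (columnCounts (x :: t)) := by
        simpa using PySem.List.foldl_append_singleton_eq_map (columnCounts (x :: t)) (List.range L) []
      dsimp only
      rw [hB]
      apply List.ext_getElem
      · rw [hAlen, hpl0len, List.length_map, List.length_range]
      · intro i hi1 hi2
        have hiL : i < L := by simpa using hi2
        have hpl0i : pl0.getD i [] = [0, 0, 0, 0, 0] := by
          rw [List.getD_eq_getElem _ _ (by rw [hpl0len]; exact hiL)]
          simp [hpl0]
        rw [← List.getD_eq_getElem _ [] hi1, hApt i, hpl0i,
          foldRow_eq (x :: t) i [0, 0, 0, 0, 0] rfl]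
        simp [columnCounts, List.getElem_range]
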